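-- pv_equiv track=rewrite | github.com/paiml/depyler | examples/hard_tree_structures.py | count_nodes_per_depth
-- ===== SOURCE A (Python) =====
-- from typing import Dict, List, Optional, Tuple
--
-- def count_nodes_per_depth(tree: List[int]) -> Dict[int, int]:
--     """Count valid nodes at each depth level. Returns dict depth -> count."""
--     counts: Dict[int, int] = {}
--     if len(tree) == 0 or tree[0] == -1:
--         return counts
--     queue: List[Tuple[int, int]] = [(0, 0)]
--     front: int = 0
--     while front < len(queue):
--         idx: int = queue[front][0]
--         depth: int = queue[front][1]
--         front = front + 1
--         if idx >= len(tree) or tree[idx] == -1: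
--             continue
--         if depth in counts:
--             counts[depth] = counts[depth] + 1
--         else:
--             counts[depth] = 1
--         left: int = 2 * idx + 1
--         if left < len(tree) and tree[left] != -1:
--             queue.append((left, depth + 1))
--         right: int = 2 * idx + 2
--         if right < len(tree) and tree[right] != -1:
--             queue.append((right, depth + 1))
--     return counts
-- ===== SOURCE B (Python) =====
-- from typing import Dict, List
--
-- def count_nodes_per_depth(tree: List[int]) -> Dict[int, int]:
--     """Count valid nodes at each depth level. Returns dict depth -> count."""
--     counts: Dict[int, int] = {}
--     n = len(tree)
--     level: List[int] = [0] if n > 0 and tree[0] != -1 else []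
--     d = 0
--     while level:
--         counts[d] = len(level)
--         level = [c for i in level for c in (2 * i + 1, 2 * i + 2)
--                  if c < n and tree[c] != -1]
--         d += 1
--     return counts
-- ===== Notes on version B (the rewrite author's own statement) =====
-- stated objective: simpler
-- what changed: Replaces the explicit queue/front-pointer BFS with per-node dict membership tests and increments by a level-at-a-time loop that records each depth's count once as the length of the current level list.
import Mathlib
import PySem

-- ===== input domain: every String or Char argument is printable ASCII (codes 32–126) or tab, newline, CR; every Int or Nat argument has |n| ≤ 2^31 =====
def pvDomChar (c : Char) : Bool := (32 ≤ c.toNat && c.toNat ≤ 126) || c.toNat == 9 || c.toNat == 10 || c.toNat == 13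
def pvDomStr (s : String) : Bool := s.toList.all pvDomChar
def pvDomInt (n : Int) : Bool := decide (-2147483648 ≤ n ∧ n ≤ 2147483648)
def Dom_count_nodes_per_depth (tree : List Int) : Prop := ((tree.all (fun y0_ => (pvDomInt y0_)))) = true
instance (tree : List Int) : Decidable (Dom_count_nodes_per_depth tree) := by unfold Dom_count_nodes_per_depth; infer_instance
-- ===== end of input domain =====

-- B replaces A's explicit queue/front-pointer BFS (per-node dict increments) by a
-- level-at-a-time recursion that records each depth's count once as the level's length
-- (objective: simpler; same asymptotic cost).


-- ===== PORT A =====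

-- size of the (index) subtree rooted at i in a heap array of length n, computed with a
-- gas argument (gas ≥ n - i is exact); used only to pre-compute a fuel bound for A's loop
def pvSizeF (gas n i : Nat) : Nat :=
  match gas with
  | 0 => 0
  | g + 1 => if i < n then 1 + pvSizeF g n (2 * i + 1) + pvSizeF g n (2 * i + 2) else 0

def pvSize (n i : Nat) : Nat := pvSizeF (n - i) n i

-- A's while loop over the state (counts, queue[front:]). The fuel argument is a pure
-- totality guard: count_nodes_per_depth passes pvSize tree.length 0 + 1, which strictly
-- dominates the number of iterations (proved in loopA_eq_levelLoop below), so the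
-- fuel-exhausted branch is never taken on any reachable state. tree[idx] is
-- PySem.List.pyGetD: exact for the 0 ≤ idx < len indices the loop ever reads (the `or`
-- guard shields the rest).
def loopA (tree : List Int) (fuel : Nat) (counts : PySem.Dict Int Int)
    (rest : List (Int × Int)) : PySem.Dict Int Int :=
  match fuel, rest with
  | _, [] => counts
  | 0, _ :: _ => counts
  | f + 1, (idx, depth) :: rest' =>
    if (tree.length : Int) ≤ idx ∨ PySem.List.pyGetD tree idx 0 = -1 then
      loopA tree f counts rest'
    else
      let counts' := if counts.contains depth then counts.insert depth (counts.getD depth 0 + 1)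
                     else counts.insert depth 1
      let c1 : List (Int × Int) :=
        if 2 * idx + 1 < (tree.length : Int) ∧ PySem.List.pyGetD tree (2 * idx + 1) 0 ≠ -1 then
          [(2 * idx + 1, depth + 1)] else []
      let c2 : List (Int × Int) :=
        if 2 * idx + 2 < (tree.length : Int) ∧ PySem.List.pyGetD tree (2 * idx + 2) 0 ≠ -1 then
          [(2 * idx + 2, depth + 1)] else []
      loopA tree f counts' (rest' ++ c1 ++ c2)

def count_nodes_per_depth (tree : List Int) : List (Int × Int) :=
  if (tree.length : Int) = 0 ∨ PySem.List.pyGetD tree 0 0 = -1 then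
    (PySem.Dict.empty : PySem.Dict Int Int).items
  else
    (loopA tree (pvSize tree.length 0 + 1) PySem.Dict.empty [((0:Int), (0:Int))]).items

-- ===== PORT B =====

-- the comprehension [c for i in level for c in (2*i+1, 2*i+2) if c < n and tree[c] != -1]
def pvChildren (tree : List Int) (level : List Int) : List Int :=
  level.flatMap (fun i =>
    ([2 * i + 1, 2 * i + 2]).filter
      (fun c => decide (c < (tree.length : Int) ∧ PySem.List.pyGetD tree c 0 ≠ -1)))

-- B's while loop over (counts, level, d). The fuel argument is a pure totality guard:
-- count_nodes_per_depth_alt passes tree.length, which dominates the number of levels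
-- (each level's indices are ≥ the level number and < tree.length), so the fuel-exhausted
-- branch is never taken on any reachable state.
def levelLoop (tree : List Int) (fuel : Nat) (counts : PySem.Dict Int Int) (level : List Int)
    (d : Int) : PySem.Dict Int Int :=
  match fuel, level with
  | _, [] => counts
  | 0, _ :: _ => counts
  | f + 1, x :: rest =>
    levelLoop tree f (counts.insert d (PySem.List.len (x :: rest))) (pvChildren tree (x :: rest))
      (d + 1)

def count_nodes_per_depth_alt (tree : List Int) : List (Int × Int) :=
  let level : List Int :=
    if 0 < (tree.length : Int) ∧ PySem.List.pyGetD tree 0 0 ≠ -1 then [0] else []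
  (levelLoop tree tree.length PySem.Dict.empty level 0).items

-- ===== PRECONDITION & SPEC =====
def Spec_count_nodes_per_depth (tree : List Int) (out : List (Int × Int)) : Prop := out = count_nodes_per_depth_alt tree
instance (tree : List Int) (out : List (Int × Int)) : Decidable (Spec_count_nodes_per_depth tree out) := by unfold Spec_count_nodes_per_depth; infer_instance

-- ===== CLAIM (what is proved, stated in full; the proofs are below) =====
def Claim_equal_count_nodes_per_depth : Prop := ∀ (tree : List Int), Dom_count_nodes_per_depth tree → Spec_count_nodes_per_depth tree (count_nodes_per_depth tree)

-- ===== LEMMAS AND PROOFS =====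

lemma pvSizeF_agree : ∀ (g1 g2 n i : Nat), n - i ≤ g1 → n - i ≤ g2 →
    pvSizeF g1 n i = pvSizeF g2 n i := by
  intro g1
  induction g1 with
  | zero =>
    intro g2 n i h1 _
    have hge : ¬ i < n := by omega
    cases g2 with
    | zero => rfl
    | succ k => simp [pvSizeF, hge]
  | succ g ih =>
    intro g2 n i h1 h2
    by_cases hlt : i < n
    · cases g2 with
      | zero => omega
      | succ k =>
        simp only [pvSizeF, if_pos hlt]
        rw [ih k n (2 * i + 1) (by omega) (by omega),
          ih k n (2 * i + 2) (by omega) (by omega)]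
    · cases g2 with
      | zero => simp [pvSizeF, hlt]
      | succ k => simp [pvSizeF, hlt]

lemma pvSize_eq {n i : Nat} (h : i < n) :
    pvSize n i = 1 + pvSize n (2 * i + 1) + pvSize n (2 * i + 2) := by
  have hni : n - i = (n - i - 1) + 1 := by omega
  rw [pvSize, hni]
  simp only [pvSizeF, if_pos h]
  rw [pvSizeF_agree (n - i - 1) (n - (2 * i + 1)) n (2 * i + 1) (by omega) (le_refl _),
    pvSizeF_agree (n - i - 1) (n - (2 * i + 2)) n (2 * i + 2) (by omega) (le_refl _)]
  rfl

lemma pvSize_pos {n i : Nat} (h : i < n) : 1 ≤ pvSize n i := by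
  rw [pvSize_eq h]; omega

def pvMeasure (n : Nat) (rest : List (Int × Int)) : Nat :=
  (rest.map (fun e => pvSize n e.1.toNat)).sum

def pvLevelMeasure (n : Nat) (level : List Int) : Nat :=
  (level.map (fun i => pvSize n i.toNat)).sum

lemma pvChildren_mem {tree : List Int} {level : List Int} {c : Int}
    (hL : ∀ i ∈ level, 0 ≤ i) (hc : c ∈ pvChildren tree level) :
    0 ≤ c ∧ c < (tree.length : Int) ∧ PySem.List.pyGetD tree c 0 ≠ -1 := by
  rcases List.mem_flatMap.1 hc with ⟨i, hi, hci⟩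
  rcases List.mem_filter.1 hci with ⟨hmem, hcond⟩
  have hcond := of_decide_eq_true hcond
  have h0 := hL i hi
  simp at hmem
  rcases hmem with rfl | rfl <;> exact ⟨by omega, hcond.1, hcond.2⟩

lemma pvChildren_measure {tree : List Int} (level : List Int)
    (hL : ∀ i ∈ level, 0 ≤ i ∧ i < (tree.length : Int)) :
    pvLevelMeasure tree.length (pvChildren tree level) + level.length
      ≤ pvLevelMeasure tree.length level := by
  induction level with
  | nil => simp [pvLevelMeasure, pvChildren]
  | cons i L ih =>
    have h0 := (hL i List.mem_cons_self).1
    have hlt : i.toNat < tree.length := by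
      have := (hL i List.mem_cons_self).2; omega
    have e1 : (2 * i + 1).toNat = 2 * i.toNat + 1 := by omega
    have e2 : (2 * i + 2).toNat = 2 * i.toNat + 2 := by omega
    have hsz := pvSize_eq hlt
    have ihL := ih (fun j hj => hL j (List.mem_cons_of_mem _ hj))
    have hsplit : pvChildren tree (i :: L)
        = ([2 * i + 1, 2 * i + 2]).filter
            (fun c => decide (c < (tree.length : Int) ∧ PySem.List.pyGetD tree c 0 ≠ -1))
          ++ pvChildren tree L := by simp [pvChildren]
    rw [List.length_cons]
    have hmsplit : pvLevelMeasure tree.length (pvChildren tree (i :: L))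
        = pvLevelMeasure tree.length
            (([2 * i + 1, 2 * i + 2]).filter
              (fun c => decide (c < (tree.length : Int) ∧ PySem.List.pyGetD tree c 0 ≠ -1)))
          + pvLevelMeasure tree.length (pvChildren tree L) := by
      rw [hsplit]; simp [pvLevelMeasure]
    have hhead : pvLevelMeasure tree.length
        (([2 * i + 1, 2 * i + 2]).filter
          (fun c => decide (c < (tree.length : Int) ∧ PySem.List.pyGetD tree c 0 ≠ -1)))
        ≤ pvSize tree.length (2 * i.toNat + 1) + pvSize tree.length (2 * i.toNat + 2) := by
      by_cases hc1 : 2 * i + 1 < (tree.length : Int) ∧ PySem.List.pyGetD tree (2 * i + 1) 0 ≠ -1 <;>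
      by_cases hc2 : 2 * i + 2 < (tree.length : Int) ∧ PySem.List.pyGetD tree (2 * i + 2) 0 ≠ -1 <;>
        simp [pvLevelMeasure, hc1, hc2, e1, e2]
    have hcons : pvLevelMeasure tree.length (i :: L)
        = pvSize tree.length i.toNat + pvLevelMeasure tree.length L := by
      simp [pvLevelMeasure]
    omega

-- an index A actually counts: in range and not deleted
def pvValid (tree : List Int) (i : Int) : Prop :=
  0 ≤ i ∧ i < (tree.length : Int) ∧ PySem.List.pyGetD tree i 0 ≠ -1

-- A's per-node counting fold over one level
def incFold (counts : PySem.Dict Int Int) (d : Int) (L : List Int) : PySem.Dict Int Int :=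
  L.foldl (fun c _ => if c.contains d then c.insert d (c.getD d 0 + 1) else c.insert d 1) counts

lemma incFold_insert (counts : PySem.Dict Int Int) (d v : Int) (L : List Int) :
    incFold (counts.insert d v) d L = counts.insert d (v + L.length) := by
  induction L generalizing counts v with
  | nil => simp [incFold]
  | cons x L ih =>
    have hstep : incFold (counts.insert d v) d (x :: L)
        = incFold ((counts.insert d v).insert d ((counts.insert d v).getD d 0 + 1)) d L := by
      simp [incFold, PySem.Dict.contains_insert_self]
    rw [hstep, PySem.Dict.getD_insert_self, PySem.Dict.insert_insert_self, ih]
    congr 1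
    simp only [List.length_cons]
    push_cast
    ring

lemma incFold_fresh (counts : PySem.Dict Int Int) (d : Int) (L : List Int)
    (hne : L ≠ []) (hd : counts.contains d = false) :
    incFold counts d L = counts.insert d (L.length : Int) := by
  cases L with
  | nil => exact absurd rfl hne
  | cons x L =>
    have hstep : incFold counts d (x :: L) = incFold (counts.insert d 1) d L := by
      simp [incFold, hd]
    rw [hstep, incFold_insert]
    congr 1
    simp only [List.length_cons]
    push_cast
    ring

lemma valid_not_skip {tree : List Int} {i : Int} (hv : pvValid tree i) :
    ¬ ((tree.length : Int) ≤ i ∨ PySem.List.pyGetD tree i 0 = -1) := by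
  rcases hv with ⟨_, hlt, hne⟩
  intro hc
  rcases hc with hc | hc
  · omega
  · exact hne hc

lemma loopA_nil (tree : List Int) (fuel : Nat) (counts : PySem.Dict Int Int) :
    loopA tree fuel counts [] = counts := by
  cases fuel <;> rfl

lemma loopA_cons_go (tree : List Int) (f : Nat) (counts : PySem.Dict Int Int) (idx depth : Int)
    (r : List (Int × Int))
    (hskip : ¬ ((tree.length : Int) ≤ idx ∨ PySem.List.pyGetD tree idx 0 = -1)) :
    loopA tree (f + 1) counts ((idx, depth) :: r)
      = loopA tree f
          (if counts.contains depth then counts.insert depth (counts.getD depth 0 + 1)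
           else counts.insert depth 1)
          (r ++ (if 2 * idx + 1 < (tree.length : Int) ∧ PySem.List.pyGetD tree (2 * idx + 1) 0 ≠ -1 then
                   [(2 * idx + 1, depth + 1)] else [])
             ++ (if 2 * idx + 2 < (tree.length : Int) ∧ PySem.List.pyGetD tree (2 * idx + 2) 0 ≠ -1 then
                   [(2 * idx + 2, depth + 1)] else [])) := by
  simp only [loopA, if_neg hskip]

lemma levelLoop_nil (tree : List Int) (fuel : Nat) (counts : PySem.Dict Int Int) (d : Int) :
    levelLoop tree fuel counts [] d = counts := by
  cases fuel <;> rfl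

lemma levelLoop_cons (tree : List Int) (f : Nat) (counts : PySem.Dict Int Int) (x : Int)
    (L : List Int) (d : Int) :
    levelLoop tree (f + 1) counts (x :: L) d
      = levelLoop tree f (counts.insert d (PySem.List.len (x :: L))) (pvChildren tree (x :: L))
          (d + 1) := by
  simp only [levelLoop]

-- the core invariant: processing the remaining level-d entries followed by already-emitted
-- level-(d+1) entries counts the level-d entries and emits their children behind C;
-- fuel decreases by exactly one per processed entry
lemma loopA_mixed (tree : List Int) :
    ∀ (L C : List Int) (counts : PySem.Dict Int Int) (d : Int) (f : Nat),
      (∀ i ∈ L, pvValid tree i) →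
      loopA tree (f + L.length) counts (L.map (fun i => (i, d)) ++ C.map (fun i => (i, d + 1)))
        = loopA tree f (incFold counts d L)
            ((C ++ pvChildren tree L).map (fun i => (i, d + 1))) := by
  intro L
  induction L with
  | nil =>
    intro C counts d f _
    simp [incFold, pvChildren]
  | cons i L ih =>
    intro C counts d f hL
    have hv := hL i List.mem_cons_self
    have hskip := valid_not_skip hv
    have hL' : ∀ j ∈ L, pvValid tree j := fun j hj => hL j (List.mem_cons_of_mem _ hj)
    have hch : ((if 2 * i + 1 < (tree.length : Int) ∧ PySem.List.pyGetD tree (2 * i + 1) 0 ≠ -1 then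
          ([(2 * i + 1, d + 1)] : List (Int × Int)) else [])
        ++ (if 2 * i + 2 < (tree.length : Int) ∧ PySem.List.pyGetD tree (2 * i + 2) 0 ≠ -1 then
          ([(2 * i + 2, d + 1)] : List (Int × Int)) else []))
        = (([2 * i + 1, 2 * i + 2]).filter
            (fun c => decide (c < (tree.length : Int) ∧ PySem.List.pyGetD tree c 0 ≠ -1))).map
            (fun c => (c, d + 1)) := by
      by_cases hc1 : 2 * i + 1 < (tree.length : Int) ∧ PySem.List.pyGetD tree (2 * i + 1) 0 ≠ -1 <;>
      by_cases hc2 : 2 * i + 2 < (tree.length : Int) ∧ PySem.List.pyGetD tree (2 * i + 2) 0 ≠ -1 <;>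
        simp [hc1, hc2]
    have hfe : f + (i :: L).length = (f + L.length) + 1 := by
      simp only [List.length_cons]
      omega
    rw [hfe]
    have e0 : (i :: L).map (fun j => (j, d)) ++ C.map (fun j => (j, d + 1))
        = (i, d) :: (L.map (fun j => (j, d)) ++ C.map (fun j => (j, d + 1))) := by simp
    rw [e0, loopA_cons_go tree (f + L.length) counts i d _ hskip]
    have harr : ((L.map (fun j => (j, d)) ++ C.map (fun j => (j, d + 1)))
          ++ (if 2 * i + 1 < (tree.length : Int) ∧ PySem.List.pyGetD tree (2 * i + 1) 0 ≠ -1 then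
              ([(2 * i + 1, d + 1)] : List (Int × Int)) else [])
          ++ (if 2 * i + 2 < (tree.length : Int) ∧ PySem.List.pyGetD tree (2 * i + 2) 0 ≠ -1 then
              ([(2 * i + 2, d + 1)] : List (Int × Int)) else []))
        = L.map (fun j => (j, d))
          ++ (C ++ ([2 * i + 1, 2 * i + 2]).filter
              (fun c => decide (c < (tree.length : Int) ∧ PySem.List.pyGetD tree c 0 ≠ -1))).map
              (fun j => (j, d + 1)) := by
      rw [List.append_assoc, List.append_assoc, hch]
      simp
    rw [harr, ih _ _ d f hL']
    have hfold : incFold (if counts.contains d then counts.insert d (counts.getD d 0 + 1)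
        else counts.insert d 1) d L = incFold counts d (i :: L) := rfl
    rw [hfold]
    have hlist : (C ++ ([2 * i + 1, 2 * i + 2]).filter
          (fun c => decide (c < (tree.length : Int) ∧ PySem.List.pyGetD tree c 0 ≠ -1)))
          ++ pvChildren tree L = C ++ pvChildren tree (i :: L) := by
      simp [pvChildren]
    rw [hlist]

lemma length_le_measure (tree : List Int) (L : List Int)
    (hL : ∀ i ∈ L, pvValid tree i) : L.length ≤ pvLevelMeasure tree.length L := by
  induction L with
  | nil => simp [pvLevelMeasure]
  | cons y M ih =>
    have hy := hL y List.mem_cons_self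
    have hlt : y.toNat < tree.length := by
      rcases hy with ⟨h0, hlt, _⟩; omega
    have h1 := pvSize_pos hlt
    have h2 := ih (fun j hj => hL j (List.mem_cons_of_mem _ hj))
    have hcons : pvLevelMeasure tree.length (y :: M)
        = pvSize tree.length y.toNat + pvLevelMeasure tree.length M := by
      simp [pvLevelMeasure]
    simp only [List.length_cons]
    omega

-- A's queue loop started on one whole level equals B's level loop, provided every key
-- already recorded is a smaller depth, A's fuel covers the total subtree measure and
-- B's fuel covers the remaining depth
lemma loopA_eq_levelLoop (tree : List Int) :
    ∀ (N : Nat) (L : List Int) (counts : PySem.Dict Int Int) (d : Int) (fA fB : Nat),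
      pvLevelMeasure tree.length L ≤ N →
      pvLevelMeasure tree.length L ≤ fA →
      (∀ i ∈ L, tree.length - i.toNat ≤ fB) →
      (∀ i ∈ L, pvValid tree i) →
      counts.keys.Nodup → (∀ k ∈ counts.keys, k < d) →
      loopA tree fA counts (L.map (fun i => (i, d))) = levelLoop tree fB counts L d := by
  intro N
  induction N with
  | zero =>
    intro L counts d fA fB hm _ _ hL _ _
    cases L with
    | nil =>
      rw [levelLoop_nil]
      simp only [List.map_nil]
      exact loopA_nil tree fA counts
    | cons x L0 =>
      exfalso
      have hx := hL x List.mem_cons_self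
      have hlt : x.toNat < tree.length := by
        rcases hx with ⟨h0, hlt, _⟩; omega
      have h1' := pvSize_pos hlt
      have h2' : pvSize tree.length x.toNat ≤ pvLevelMeasure tree.length (x :: L0) := by
        simp only [pvLevelMeasure, List.map_cons, List.sum_cons]
        omega
      omega
  | succ N ih =>
    intro L counts d fA fB hm hfA hfB hL hnd hkeys
    cases L with
    | nil =>
      rw [levelLoop_nil]
      simp only [List.map_nil]
      exact loopA_nil tree fA counts
    | cons x L0 =>
      have hfresh : counts.contains d = false := by
        cases hc : counts.contains d
        · rfl
        · exact absurd (hkeys d ((PySem.Dict.contains_iff_mem_keys counts d).mp hc)) (by omega)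
      have hLv : ∀ i ∈ (x :: L0), 0 ≤ i ∧ i < (tree.length : Int) :=
        fun i hi => ⟨(hL i hi).1, (hL i hi).2.1⟩
      have hchv : ∀ i ∈ pvChildren tree (x :: L0), pvValid tree i := by
        intro i hi
        have := pvChildren_mem (fun j hj => (hL j hj).1) hi
        exact ⟨this.1, this.2.1, this.2.2⟩
      have hmeasC := pvChildren_measure (x :: L0) hLv
      have hlen_le := length_le_measure tree (x :: L0) hL
      have hx := hL x List.mem_cons_self
      have hxlt : x.toNat < tree.length := by
        rcases hx with ⟨h0, hlt, _⟩; omega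
      have hfB1 : 1 ≤ fB := by
        have := hfB x List.mem_cons_self
        omega
      have hlenInt : (((x :: L0).length : Nat) : Int) = PySem.List.len (x :: L0) := by
        simp [PySem.List.len_eq]
      have hfuel : (x :: L0).length ≤ fA := le_trans hlen_le hfA
      have hkeys' : (counts.insert d (PySem.List.len (x :: L0))).keys = counts.keys ++ [d] :=
        PySem.Dict.keys_insert_of_not_contains counts _ hfresh
      calc loopA tree fA counts ((x :: L0).map (fun i => (i, d)))
          = loopA tree ((fA - (x :: L0).length) + (x :: L0).length) counts
              ((x :: L0).map (fun i => (i, d))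
                ++ List.map (fun i => (i, d + 1)) ([] : List Int)) := by
            rw [Nat.sub_add_cancel hfuel]
            simp
        _ = loopA tree (fA - (x :: L0).length) (incFold counts d (x :: L0))
              ((([] : List Int) ++ pvChildren tree (x :: L0)).map (fun i => (i, d + 1))) :=
            loopA_mixed tree (x :: L0) [] counts d (fA - (x :: L0).length) hL
        _ = loopA tree (fA - (x :: L0).length) (counts.insert d (PySem.List.len (x :: L0)))
              ((pvChildren tree (x :: L0)).map (fun i => (i, d + 1))) := by
            rw [incFold_fresh counts d (x :: L0) (by simp) hfresh, hlenInt]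
            simp
        _ = levelLoop tree (fB - 1) (counts.insert d (PySem.List.len (x :: L0)))
              (pvChildren tree (x :: L0)) (d + 1) := by
            apply ih (pvChildren tree (x :: L0)) _ (d + 1) _ _
            · -- measure within N
              simp only [List.length_cons] at hmeasC hlen_le ⊢
              omega
            · -- A-fuel still covers the measure
              simp only [List.length_cons] at hmeasC hlen_le ⊢
              omega
            · -- B-fuel still covers the remaining depth
              intro c hc
              rcases List.mem_flatMap.1 hc with ⟨i, hi, hci⟩
              rcases List.mem_filter.1 hci with ⟨hmem, hcond⟩
              have h0 := (hL i hi).1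
              have hfb := hfB i hi
              have hcn := (of_decide_eq_true hcond).1
              simp at hmem
              rcases hmem with rfl | rfl <;> omega
            · exact hchv
            · rw [hkeys']
              refine List.Nodup.append hnd (by simp) ?_
              intro a ha hb
              simp at hb
              subst hb
              exact absurd (hkeys a ha) (by omega)
            · rw [hkeys']
              intro k hk
              rcases List.mem_append.1 hk with hk | hk
              · have := hkeys k hk; omega
              · simp at hk; omega
        _ = levelLoop tree fB counts (x :: L0) d := by
            have hfb : fB = (fB - 1) + 1 := by omega
            conv_rhs => rw [hfb]
            rw [levelLoop_cons]

-- ===== VERDICT (by name: the statement is the Claim_ definition above) =====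
theorem count_nodes_per_depth_spec : Claim_equal_count_nodes_per_depth := by
  intro tree _
  unfold Spec_count_nodes_per_depth count_nodes_per_depth count_nodes_per_depth_alt
  by_cases hg : (tree.length : Int) = 0 ∨ PySem.List.pyGetD tree 0 0 = -1
  · have hlv : ¬ (0 < (tree.length : Int) ∧ PySem.List.pyGetD tree 0 0 ≠ -1) := by
      rcases hg with hg | hg
      · intro hc; omega
      · intro hc; exact hc.2 hg
    rw [if_pos hg]
    show (PySem.Dict.empty : PySem.Dict Int Int).items
        = (levelLoop tree tree.length PySem.Dict.empty
            (if 0 < (tree.length : Int) ∧ PySem.List.pyGetD tree 0 0 ≠ -1 then [0] else []) 0).items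
    rw [if_neg hlv, levelLoop_nil]
  · rw [if_neg hg]
    have hlv : 0 < (tree.length : Int) ∧ PySem.List.pyGetD tree 0 0 ≠ -1 := by
      rcases not_or.1 hg with ⟨h1, h2⟩
      exact ⟨by omega, h2⟩
    have hv0 : pvValid tree 0 := ⟨le_refl 0, hlv.1, hlv.2⟩
    have hL : ∀ i ∈ ([0] : List Int), pvValid tree i := by
      intro i hi; simp at hi; subst hi; exact hv0
    show (loopA tree (pvSize tree.length 0 + 1) PySem.Dict.empty [((0:Int), (0:Int))]).items
        = (levelLoop tree tree.length PySem.Dict.empty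
            (if 0 < (tree.length : Int) ∧ PySem.List.pyGetD tree 0 0 ≠ -1 then [0] else []) 0).items
    rw [if_pos hlv]
    congr 1
    have e0 : ([((0:Int), (0:Int))] : List (Int × Int))
        = ([0] : List Int).map (fun i => (i, (0:Int))) := by simp
    rw [e0]
    exact loopA_eq_levelLoop tree (pvLevelMeasure tree.length [0]) [0] PySem.Dict.empty 0
      (pvSize tree.length 0 + 1) tree.length (le_refl _)
      (by simp [pvLevelMeasure])
      (by intro i hi; simp at hi; subst hi; simp)
      hL
      (by simp [PySem.Dict.keys_empty])
      (by simp [PySem.Dict.keys_empty])
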